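-- pv_equiv track=rewrite | github.com/Kaiserreich/HOI4-Validator | Scripts/findNewlineIndices.py | find_indices_of_new_lines
-- ===== SOURCE A (Python) =====
-- def find_indices_of_new_lines(contents):
--     new_line_indices = []
--     index = -1
--     while True:
--         index = contents.find('\n', index+1)
--         # find returns -1 when nothing is found after the starting index
--         if index != -1:
--             new_line_indices += [index]
--         else:
--             break
--     return new_line_indices
-- ===== SOURCE B (Python) =====
-- def find_indices_of_new_lines(contents):
--     # Partition on '\n' and recover each newline's index as a running prefix sum
--     # of piece lengths (one '\n' sits between consecutive pieces).
--     pieces = contents.split('\n')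
--     indices = []
--     offset = 0
--     for piece in pieces[:-1]:
--         offset += len(piece)
--         indices.append(offset)
--         offset += 1
--     return indices
-- ===== Notes on version B (the rewrite author's own statement) =====
-- stated objective: alternative
-- what changed: Replaces the repeated str.find-from-last-hit loop with a single split on the newline character followed by a prefix-sum walk over the pieces, computing each newline index from segment lengths.
import Mathlib
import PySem

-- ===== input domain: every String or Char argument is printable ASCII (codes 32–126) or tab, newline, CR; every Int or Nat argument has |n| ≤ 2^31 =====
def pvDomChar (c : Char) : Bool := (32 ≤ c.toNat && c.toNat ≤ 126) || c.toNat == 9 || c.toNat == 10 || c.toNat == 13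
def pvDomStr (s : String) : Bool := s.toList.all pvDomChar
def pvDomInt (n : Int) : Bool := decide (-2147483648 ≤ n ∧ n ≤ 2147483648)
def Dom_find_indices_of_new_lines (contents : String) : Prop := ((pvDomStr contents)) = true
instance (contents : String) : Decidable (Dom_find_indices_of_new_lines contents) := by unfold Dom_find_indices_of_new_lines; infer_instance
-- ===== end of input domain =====

-- B replaces A's repeated find-from-last-hit loop with one split('\n') plus a
-- prefix-sum walk over the pieces (alternative algorithm, same return value).

-- ===== PORT A =====
-- the while-True loop: index = contents.find('\n', index+1); stop at -1.
-- fuel is only a totality guard: each found index is strictly larger than the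
-- previous and below the length, so length+1 steps always suffice.
def findNLGoA (s : List Char) (fuel : Nat) (index : Int) (acc : List Int) : List Int :=
  match fuel with
  | 0 => acc
  | n + 1 =>
    let i := PySem.Chars.findFrom s ['\n'] (index + 1) none
    if i ≠ -1 then findNLGoA s n i (acc ++ [i]) else acc

def find_indices_of_new_lines (contents : String) : List Int :=
  findNLGoA contents.toList (contents.toList.length + 1) (-1) []

-- ===== PORT B =====
-- the 'for piece in pieces[:-1]' loop with its (offset, indices) state
def findNLGoB : List (List Char) → Int → List Int → List Int
  | [], _, indices => indices
  | p :: ps, offset, indices =>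
      findNLGoB ps (offset + p.length + 1) (indices ++ [offset + (p.length : Int)])

-- pieces[:-1] is exactly List.dropLast (drop the final piece; [] stays [])
def find_indices_of_new_lines_alt (contents : String) : List Int :=
  findNLGoB (PySem.Chars.splitOn contents.toList ['\n']).dropLast 0 []

-- ===== PRECONDITION & SPEC =====
def Spec_find_indices_of_new_lines (contents : String) (out : List Int) : Prop := out = find_indices_of_new_lines_alt contents
instance (contents : String) (out : List Int) : Decidable (Spec_find_indices_of_new_lines contents out) := by unfold Spec_find_indices_of_new_lines; infer_instance

-- ===== CLAIM (what is proved, stated in full; the proofs are below) =====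
def Claim_equal_find_indices_of_new_lines : Prop := ∀ (contents : String), Dom_find_indices_of_new_lines contents → Spec_find_indices_of_new_lines contents (find_indices_of_new_lines contents)

-- ===== LEMMAS AND PROOFS =====

-- reference value: the newline positions of s, starting at offset off
def nlIdx : List Char → Int → List Int
  | [], _ => []
  | c :: t, off => if c = '\n' then off :: nlIdx t (off + 1) else nlIdx t (off + 1)

-- structural single-char splitter (reference for Chars.splitOn s ['\n'])
def splitNl : List Char → List (List Char)
  | [] => [[]]
  | c :: t =>
      if c = '\n' then [] :: splitNl t
      else match splitNl t with
           | [] => [[c]]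
           | p :: ps => (c :: p) :: ps

theorem splitNl_ne_nil (s : List Char) : splitNl s ≠ [] := by
  cases s with
  | nil => simp [splitNl]
  | cons c t =>
    simp only [splitNl]
    split_ifs
    · simp
    · cases h : splitNl t <;> simp

-- prepend x onto the head piece
def hcons (x : List Char) : List (List Char) → List (List Char)
  | [] => [x]
  | p :: ps => (x ++ p) :: ps

theorem go_eq_splitNl (fuel : Nat) : ∀ (l cur : List Char) (acc : List (List Char)),
    l.length < fuel →
    PySem.Chars.splitOn.go ['\n'] fuel l cur acc = acc.reverse ++ hcons cur.reverse (splitNl l) := by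
  induction fuel with
  | zero => intro l cur acc h; omega
  | succ n ih =>
    intro l cur acc h
    cases l with
    | nil =>
      simp [PySem.Chars.splitOn.go, splitNl, hcons]
    | cons c rest =>
      simp only [PySem.Chars.splitOn.go]
      by_cases hc : c = '\n'
      · subst hc
        have hpre : List.isPrefixOf ['\n'] ('\n' :: rest) = true := by
          simp [List.isPrefixOf]
        rw [if_pos hpre]
        have hlen : rest.length < n := by simpa using Nat.lt_of_succ_lt_succ h
        rw [show List.drop (List.length ['\n']) ('\n' :: rest) = rest by simp]
        rw [ih rest [] (cur.reverse :: acc) hlen]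
        have hne := splitNl_ne_nil rest
        cases hsp : splitNl rest with
        | nil => exact absurd hsp hne
        | cons p ps => simp [splitNl, hcons, hsp]
      · have hpre : List.isPrefixOf ['\n'] (c :: rest) = false := by
          simp [List.isPrefixOf]
          intro hq; exact hc hq.symm
        rw [if_neg (by simp [hpre])]
        have hlen : rest.length < n := by simpa using Nat.lt_of_succ_lt_succ h
        rw [ih rest (c :: cur) acc hlen]
        have hne := splitNl_ne_nil rest
        cases hsp : splitNl rest with
        | nil => exact absurd hsp hne
        | cons p ps => simp [splitNl, hcons, hsp, hc]

theorem splitOn_eq_splitNl (s : List Char) :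
    PySem.Chars.splitOn s ['\n'] = splitNl s := by
  have h := go_eq_splitNl (s.length + 1) s [] [] (by omega)
  rw [PySem.Chars.splitOn] at *
  rw [h]
  have hne := splitNl_ne_nil s
  cases hsp : splitNl s with
  | nil => exact absurd hsp hne
  | cons p ps => simp [hcons]

-- splitNl has a single piece iff s has no newline (only the direction we need)
theorem nlIdx_of_splitNl_singleton : ∀ (s : List Char) (off : Int),
    (splitNl s).length = 1 → nlIdx s off = [] := by
  intro s
  induction s with
  | nil => intro off _; rfl
  | cons c t ih =>
    intro off hlen
    by_cases hc : c = '\n'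
    · subst hc
      simp [splitNl] at hlen
      have := splitNl_ne_nil t
      cases h : splitNl t with
      | nil => exact absurd h this
      | cons p ps => rw [h] at hlen; simp at hlen
    · simp only [splitNl, if_neg hc] at hlen
      cases h : splitNl t with
      | nil => exact absurd h (splitNl_ne_nil t)
      | cons p ps =>
        rw [h] at hlen
        simp at hlen
        simp only [nlIdx, if_neg hc]
        exact ih (off + 1) (by rw [h]; simpa using hlen)

-- B's loop over the pieces computes the newline positions
theorem goB_eq_nlIdx : ∀ (s : List Char) (off : Int) (ind : List Int),
    findNLGoB (splitNl s).dropLast off ind = ind ++ nlIdx s off := by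
  intro s
  induction s with
  | nil => intro off ind; simp [splitNl, findNLGoB, nlIdx]
  | cons c t ih =>
    intro off ind
    by_cases hc : c = '\n'
    · subst hc
      have hne := splitNl_ne_nil t
      rw [show splitNl ('\n' :: t) = [] :: splitNl t from by simp [splitNl]]
      rw [List.dropLast_cons_of_ne_nil hne]
      simp only [findNLGoB, List.length_nil, Int.natCast_zero, add_zero]
      rw [ih (off + 1) (ind ++ [off])]
      simp [nlIdx]
    · cases h : splitNl t with
      | nil => exact absurd h (splitNl_ne_nil t)
      | cons p ps =>
        rw [show splitNl (c :: t) = (c :: p) :: ps from by simp [splitNl, hc, h]]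
        cases ps with
        | nil =>
          rw [show ((c :: p) :: ([] : List (List Char))).dropLast = [] from rfl]
          simp only [findNLGoB]
          have : nlIdx (c :: t) off = nlIdx t (off + 1) := by simp [nlIdx, hc]
          rw [this, nlIdx_of_splitNl_singleton t (off + 1) (by rw [h]; rfl)]
          simp
        | cons q qs =>
          rw [List.dropLast_cons_of_ne_nil (by simp)]
          simp only [findNLGoB]
          have hIH := ih (off + 1) ind
          rw [h, List.dropLast_cons_of_ne_nil (by simp)] at hIH
          simp only [findNLGoB] at hIH
          have e1 : off + ((c :: p).length : Int) = (off + 1) + (p.length : Int) := by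
            simp only [List.length_cons]; push_cast; ring
          rw [e1, hIH]
          simp [nlIdx, hc]

-- no newline in s ⇒ no indices
theorem nlIdx_of_not_mem : ∀ (s : List Char) (off : Int), '\n' ∉ s → nlIdx s off = [] := by
  intro s
  induction s with
  | nil => intro off _; rfl
  | cons c t ih =>
    intro off hmem
    have hc : c ≠ '\n' := fun h => hmem (by simp [h])
    simp only [nlIdx, if_neg hc]
    exact ih (off + 1) (fun h => hmem (List.mem_cons_of_mem _ h))

-- peel the first newline, sitting at position m
theorem nlIdx_first : ∀ (m : Nat) (t : List Char) (off : Int) (hm : m < t.length),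
    t[m] = '\n' → (∀ i (h : i < m), t[i]'(by omega) ≠ '\n') →
    nlIdx t off = (off + m) :: nlIdx (t.drop (m + 1)) (off + m + 1) := by
  intro m
  induction m with
  | zero =>
    intro t off hm hget _
    cases t with
    | nil => simp at hm
    | cons c u =>
      simp at hget
      simp [nlIdx, hget]
  | succ k ih =>
    intro t off hm hget hmin
    cases t with
    | nil => simp at hm
    | cons c u =>
      have hc : c ≠ '\n' := by
        have := hmin 0 (Nat.succ_pos k)
        simpa using this
      simp only [nlIdx, if_neg hc]
      have hm' : k < u.length := by simpa using Nat.lt_of_succ_lt_succ hm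
      have hget' : u[k] = '\n' := by simpa using hget
      have hmin' : ∀ i (h : i < k), u[i]'(by omega) ≠ '\n' := by
        intro i hi
        have := hmin (i + 1) (by omega)
        simpa using this
      rw [ih u (off + 1) hm' hget' hmin']
      rw [show List.drop (k + 1 + 1) (c :: u) = List.drop (k + 1) u from rfl]
      congr 1
      · push_cast; ring
      · congr 1
        push_cast; ring

-- prefix ['\n'] of a drop ⇔ that position holds '\n'
theorem prefix_drop_iff (t : List Char) (m : Nat) (hm : m < t.length) :
    ['\n'] <+: t.drop m ↔ t[m] = '\n' := by
  constructor
  · rintro ⟨v, hv⟩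
    have h0 : (t.drop m)[0]? = some '\n' := by rw [← hv]; rfl
    rw [List.getElem?_drop] at h0
    rw [List.getElem?_eq_getElem (by omega : m + 0 < t.length)] at h0
    simpa using h0
  · intro h
    refine ⟨t.drop (m + 1), ?_⟩
    rw [List.drop_eq_getElem_cons hm, h]
    rfl

-- A's loop, from search start k, produces the newline positions of drop k s
theorem goA_eq_nlIdx (fuel : Nat) : ∀ (s : List Char) (k : Nat) (acc : List Int),
    k ≤ s.length → s.length - k < fuel →
    findNLGoA s fuel ((k : Int) - 1) acc = acc ++ nlIdx (s.drop k) k := by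
  induction fuel with
  | zero => intro s k acc _ h; omega
  | succ n ih =>
    intro s k acc hk hfuel
    simp only [findNLGoA]
    rw [show (k : Int) - 1 + 1 = (k : Int) by ring]
    rw [PySem.Chars.findFrom_natCast s ['\n'] k hk]
    by_cases hfind : PySem.Chars.find (s.drop k) ['\n'] = -1
    · rw [if_pos hfind]
      have hnin : '\n' ∉ s.drop k := by
        intro hmem
        have hinf : ['\n'] <:+: s.drop k := by
          obtain ⟨l1, l2, hl⟩ := List.append_of_mem hmem
          exact ⟨l1, l2, by simp [hl]⟩
        exact (PySem.Chars.find_eq_neg_one_iff _ _).mp hfind hinf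
      rw [nlIdx_of_not_mem _ _ hnin, List.append_nil]
      simp
    · rw [if_neg hfind]
      have hge : 0 ≤ PySem.Chars.find (s.drop k) ['\n'] := by
        have := PySem.Chars.neg_one_le_find (s.drop k) ['\n']
        omega
      set j := PySem.Chars.find (s.drop k) ['\n'] with hj
      clear_value j
      have hspec := PySem.Chars.find_spec (s := s.drop k) (sub := ['\n']) (hj ▸ hge)
      obtain ⟨hpre, hmin⟩ := hspec
      rw [← hj] at hpre hmin
      have hjlen : j.toNat < (s.drop k).length := by
        obtain ⟨v, hv⟩ := hpre
        have h1 : (s.drop k).drop j.toNat ≠ [] := by rw [← hv]; simp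
        rw [← List.length_pos_iff_ne_nil, List.length_drop] at h1
        omega
      have hdroplen : (s.drop k).length = s.length - k := by simp
      have hget : (s.drop k)[j.toNat] = '\n' :=
        (prefix_drop_iff (s.drop k) j.toNat hjlen).mp hpre
      have hmin' : ∀ i (h : i < j.toNat), (s.drop k)[i]'(by omega) ≠ '\n' := by
        intro i hi hcontra
        exact hmin i hi ((prefix_drop_iff (s.drop k) i (by omega)).mpr hcontra)
      have hki : (k : Int) + j ≠ -1 := by omega
      simp only [ite_not, if_neg (by omega : ¬ ((k : Int) + j = -1))]
      have hk' : k + j.toNat + 1 ≤ s.length := by omega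
      have hfuel' : s.length - (k + j.toNat + 1) < n := by omega
      have hIH := ih s (k + j.toNat + 1) (acc ++ [(k : Int) + j]) hk' hfuel'
      have hidx : ((k + j.toNat + 1 : Nat) : Int) - 1 = (k : Int) + j := by
        push_cast
        rw [Int.toNat_of_nonneg hge]
        ring
      rw [hidx] at hIH
      rw [hIH]
      rw [nlIdx_first j.toNat (s.drop k) (k : Int) hjlen hget hmin']
      rw [List.drop_drop]
      have e1 : (k : Int) + j = (k : Int) + (j.toNat : Int) := by
        rw [Int.toNat_of_nonneg hge]
      have e2 : ((k + j.toNat + 1 : Nat) : Int) = (k : Int) + (j.toNat : Int) + 1 := by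
        push_cast; ring
      rw [show k + (j.toNat + 1) = k + j.toNat + 1 from by omega]
      simp [e1, e2]

-- ===== VERDICT (by name: the statement is the Claim_ definition above) =====
theorem find_indices_of_new_lines_spec : Claim_equal_find_indices_of_new_lines := by
  intro contents _
  unfold Spec_find_indices_of_new_lines find_indices_of_new_lines find_indices_of_new_lines_alt
  rw [splitOn_eq_splitNl, goB_eq_nlIdx]
  have h := goA_eq_nlIdx (contents.toList.length + 1) contents.toList 0 []
    (Nat.zero_le _) (by omega)
  simpa using h
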